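-- pv_equiv track=rewrite | github.com/Greenkack/orama-goma-burama-go | tools/repo_porter_select.py | extract_import_suggestions
-- ===== SOURCE A (Python) =====
-- from typing import Dict, List, Set, Tuple
--
-- def extract_import_suggestions(patch_text: str) -> List[str]:
--     lines = patch_text.splitlines()
--     out: List[str] = []
--     in_imp = False
--     for line in lines:
--         ls = line.strip()
--         if ls.startswith("# --- REQUIRED IMPORT SUGGESTIONS"):
--             in_imp = True
--             continue
--         if in_imp and ls.startswith("# --- DEF BLOCK START:"):
--             break
--         if in_imp:
--             if line.strip():
--                 out.append(line)
--     return out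
-- ===== SOURCE B (Python) =====
-- from typing import List
--
-- _REQ = "# --- REQUIRED IMPORT SUGGESTIONS"
-- _DEF = "# --- DEF BLOCK START:"
--
-- def extract_import_suggestions(patch_text: str) -> List[str]:
--     lines = patch_text.splitlines()
--     start = next((i for i, l in enumerate(lines) if l.strip().startswith(_REQ)), None)
--     if start is None:
--         return []
--     body = lines[start + 1:]
--     end = next((j for j, l in enumerate(body) if l.strip().startswith(_DEF)), len(body))
--     return [l for l in body[:end]
--             if l.strip() and not l.strip().startswith(_REQ)]
-- ===== Notes on version B (the rewrite author's own statement) =====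
-- stated objective: alternative
-- what changed: Replaces the flag-driven state-machine loop with a two-phase decomposition: locate the start marker index, locate the end boundary in the remaining lines, then filter that slice with a comprehension.
import Mathlib
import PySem

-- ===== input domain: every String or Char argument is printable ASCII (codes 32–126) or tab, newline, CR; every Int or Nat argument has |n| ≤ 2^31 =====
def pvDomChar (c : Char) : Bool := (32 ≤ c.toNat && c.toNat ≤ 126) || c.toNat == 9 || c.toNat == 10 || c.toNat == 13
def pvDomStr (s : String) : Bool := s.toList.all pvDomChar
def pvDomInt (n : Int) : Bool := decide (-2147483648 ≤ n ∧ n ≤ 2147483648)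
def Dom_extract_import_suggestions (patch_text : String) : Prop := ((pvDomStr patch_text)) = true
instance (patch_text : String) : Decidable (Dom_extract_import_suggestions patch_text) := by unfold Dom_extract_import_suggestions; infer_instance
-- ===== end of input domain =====

-- B replaces A's flag-driven state-machine loop by a two-phase decomposition
-- (find the start-marker index, find the end boundary, filter the slice); same O(n), return value proved equal.

def pvREQ : String := "# --- REQUIRED IMPORT SUGGESTIONS"
def pvDEF : String := "# --- DEF BLOCK START:"

-- ===== PORT A =====
-- the for-loop with `continue`/`break` over (lines, in_imp); output built in return position
def pvALoop : List String → Bool → List String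
  | [], _ => []
  | line :: rest, inImp =>
    let ls := PySem.Str.strip line
    if PySem.Str.startswith ls pvREQ then pvALoop rest true
    else if inImp && PySem.Str.startswith ls pvDEF then []
    else if inImp && (PySem.Str.strip line != "") then line :: pvALoop rest inImp
    else pvALoop rest inImp

def extract_import_suggestions (patch_text : String) : List String :=
  pvALoop (PySem.Str.splitlines patch_text) false

-- ===== PORT B =====
def pvIsReq (l : String) : Bool := PySem.Str.startswith (PySem.Str.strip l) pvREQ
def pvIsDef (l : String) : Bool := PySem.Str.startswith (PySem.Str.strip l) pvDEF
def pvKeep (l : String) : Bool := (PySem.Str.strip l != "") && !(pvIsReq l)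

def extract_import_suggestions_alt (patch_text : String) : List String :=
  let lines := PySem.Str.splitlines patch_text
  match lines.findIdx? pvIsReq with
  | none => []
  | some i =>
    let body := lines.drop (i + 1)
    (body.take (body.findIdx pvIsDef)).filter pvKeep

-- ===== PRECONDITION & SPEC =====
def Spec_extract_import_suggestions (patch_text : String) (out : List String) : Prop := out = extract_import_suggestions_alt patch_text
instance (patch_text : String) (out : List String) : Decidable (Spec_extract_import_suggestions patch_text out) := by unfold Spec_extract_import_suggestions; infer_instance

-- ===== CLAIM (what is proved, stated in full; the proofs are below) =====
def Claim_equal_extract_import_suggestions : Prop := ∀ (patch_text : String), Dom_extract_import_suggestions patch_text → Spec_extract_import_suggestions patch_text (extract_import_suggestions patch_text)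

-- ===== LEMMAS AND PROOFS =====

-- the two markers have incomparable prefixes, so no line is both a REQ line and a DEF line
theorem pvIsDef_of_isReq (l : String) (h : pvIsReq l = true) : pvIsDef l = false := by
  by_contra hd
  have hd' : pvIsDef l = true := by
    cases hdef : pvIsDef l
    · exact absurd hdef hd
    · rfl
  unfold pvIsReq at h
  unfold pvIsDef at hd'
  rw [PySem.Str.startswith_eq, PySem.Chars.startswith_iff] at h hd'
  have hlen : pvDEF.toList.length ≤ pvREQ.toList.length := by decide
  have : pvDEF.toList <+: pvREQ.toList :=
    List.prefix_of_prefix_length_le hd' h hlen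
  exact absurd this (by decide)

-- once in_imp is true, the loop is: take until the first DEF line, keep nonempty non-REQ lines
theorem pvALoop_true (xs : List String) :
    pvALoop xs true = (xs.take (xs.findIdx pvIsDef)).filter pvKeep := by
  induction xs with
  | nil => rfl
  | cons l rest ih =>
    by_cases h1 : pvIsReq l = true
    · have hd := pvIsDef_of_isReq l h1
      simp [pvIsReq] at h1
      simp [pvIsDef] at hd
      simp [pvALoop, List.findIdx_cons, pvKeep, pvIsReq, pvIsDef, h1, hd, ih]
    · simp [pvIsReq] at h1
      by_cases h2 : pvIsDef l = true
      · simp [pvIsDef] at h2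
        simp [pvALoop, List.findIdx_cons, h1, h2, pvIsDef]
      · simp [pvIsDef] at h2
        by_cases h3 : PySem.Str.strip l = ""
        · have e1 : PySem.Chars.startswith ([] : List Char) pvREQ.toList = false := by decide
          have e2 : PySem.Chars.startswith ([] : List Char) pvDEF.toList = false := by decide
          simp [pvALoop, List.findIdx_cons, pvKeep, pvIsReq, pvIsDef, h3, e1, e2, ih]
        · simp [pvALoop, List.findIdx_cons, pvKeep, pvIsReq, pvIsDef,
            h1, h2, h3, ih]

-- before the start marker the loop just scans for the first REQ line
theorem pvALoop_false (xs : List String) :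
    pvALoop xs false = (match xs.findIdx? pvIsReq with
      | none => []
      | some i => pvALoop (xs.drop (i + 1)) true) := by
  induction xs with
  | nil => rfl
  | cons l rest ih =>
    by_cases h1 : pvIsReq l = true
    · have h1' := h1
      simp [pvIsReq] at h1'
      rw [List.findIdx?_cons]
      simp [pvALoop, h1, h1']
    · have h1' : pvIsReq l = false := by
        cases hx : pvIsReq l
        · rfl
        · exact absurd hx h1
      have h1c := h1'
      simp [pvIsReq] at h1c
      rw [List.findIdx?_cons]
      simp [pvALoop, h1c, h1']
      rw [ih]
      cases hfind : rest.findIdx? pvIsReq <;> simp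

-- ===== VERDICT (by name: the statement is the Claim_ definition above) =====
theorem extract_import_suggestions_spec : Claim_equal_extract_import_suggestions := by
  intro patch_text _
  unfold Spec_extract_import_suggestions extract_import_suggestions extract_import_suggestions_alt
  rw [pvALoop_false]
  cases h : (PySem.Str.splitlines patch_text).findIdx? pvIsReq <;>
    simp only [h, pvALoop_true]
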